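-- pv_equiv track=rewrite | github.com/cashinflash/CashRocketAnaheim | apply/engine_v2/policy/engine.py | _drop_tier
-- ===== SOURCE A (Python) =====
-- _TIER_LADDER = [255, 200, 150, 100, 0]
--
-- def _drop_tier(current: int, steps: int) -> int:
--     if current not in _TIER_LADDER:
--         # Snap up to the nearest tier in the ladder
--         for t in _TIER_LADDER:
--             if t <= current:
--                 current = t
--                 break
--         else:
--             current = 0
--     idx = _TIER_LADDER.index(current)
--     new_idx = min(len(_TIER_LADDER) - 1, idx + steps)
--     return _TIER_LADDER[new_idx]
-- ===== SOURCE B (Python) =====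
-- _LOWER = {255: 200, 200: 150, 150: 100, 100: 0, 0: 0}
-- _HIGHER = {0: 100, 100: 150, 150: 200, 200: 255, 255: 255}
--
--
-- def _drop_tier(current: int, steps: int) -> int:
--     # Snap: the highest known tier not above `current` (0 when current is below all).
--     tier = max((t for t in _LOWER if t <= current), default=0)
--     # Walk the successor maps, clamping at the bottom (0) and at the top (255).
--     while steps > 0 and tier != 0:
--         tier = _LOWER[tier]
--         steps -= 1
--     while steps < 0 and tier != 255:
--         tier = _HIGHER[tier]
--         steps += 1
--     return tier
-- ===== Notes on version B (the rewrite author's own statement) =====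
-- stated objective: alternative
-- what changed: B replaces A's list-index arithmetic (snap loop, .index() rescan, min-clamped index, list subscript) with successor/predecessor tier maps walked step by step with clamping at both ends of the ladder; no index is ever computed.
-- intended difference: On inputs where the snapped tier index plus steps lands in -4..-1 (climbing past the top tier), A's negative list index wraps around and returns a lower tier (200/150/100/0) while B clamps at the top and returns 255, the intended result of moving up beyond the highest tier. — e.g. on _drop_tier(255, -1): A returns 0, B returns 255
import Mathlib
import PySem

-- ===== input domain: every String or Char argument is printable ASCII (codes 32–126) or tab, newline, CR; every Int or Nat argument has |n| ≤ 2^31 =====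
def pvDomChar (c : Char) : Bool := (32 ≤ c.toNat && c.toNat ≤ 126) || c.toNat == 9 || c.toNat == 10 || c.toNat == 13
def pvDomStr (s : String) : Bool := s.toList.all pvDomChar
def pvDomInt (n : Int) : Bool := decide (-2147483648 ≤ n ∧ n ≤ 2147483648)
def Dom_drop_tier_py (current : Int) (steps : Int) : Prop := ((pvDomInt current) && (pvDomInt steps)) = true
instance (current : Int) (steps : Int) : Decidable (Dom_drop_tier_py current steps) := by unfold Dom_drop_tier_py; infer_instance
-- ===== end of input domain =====

-- B drops the ladder/index arithmetic entirely: it walks successor/predecessor tier maps step by step,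
-- clamping at both ends; where A's negative index wraps (D_) or raises (outside Pre_), B returns the top tier.
-- ===== PORT A =====
def pvLadder : List Int := [255, 200, 150, 100, 0]

-- A's for-else snap loop: first ladder entry t with t ≤ current, else 0
def pvSnapA : List Int → Int → Int
  | [], _ => 0
  | t :: ts, c => if t ≤ c then t else pvSnapA ts c

def drop_tier_py (current : Int) (steps : Int) : Int :=
  let current := if current ∈ pvLadder then current else pvSnapA pvLadder current
  let idx : Int := ((PySem.List.index? pvLadder current).getD 0 : Nat)
  let newIdx := min ((pvLadder.length : Int) - 1) (idx + steps)
  -- Python _TIER_LADDER[new_idx] (Pre_ excludes the IndexError inputs)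
  (PySem.List.pyGet? pvLadder newIdx).getD 0

-- ===== PORT B =====
def pvLower : PySem.Dict Int Int :=
  PySem.Dict.ofList [(255, 200), (200, 150), (150, 100), (100, 0), (0, 0)]
def pvHigher : PySem.Dict Int Int :=
  PySem.Dict.ofList [(0, 100), (100, 150), (150, 200), (200, 255), (255, 255)]

-- the `while steps > 0 and tier != 0` loop; fuel 5 = number of tiers, never exhausted
-- because tier reaches the absorbing key 0 after at most 4 lookups from any key
def pvDown : Nat → Int → Int → Int × Int
  | 0, tier, steps => (tier, steps)
  | f + 1, tier, steps =>
      if 0 < steps ∧ tier ≠ 0 then pvDown f (PySem.Dict.getD pvLower tier 0) (steps - 1)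
      else (tier, steps)

-- the `while steps < 0 and tier != 255` loop; fuel 5 for the same reason (absorbing key 255)
def pvUp : Nat → Int → Int → Int
  | 0, tier, _ => tier
  | f + 1, tier, steps =>
      if steps < 0 ∧ tier ≠ 255 then pvUp f (PySem.Dict.getD pvHigher tier 255) (steps + 1)
      else tier

def drop_tier_py_alt (current : Int) (steps : Int) : Int :=
  let tier := PySem.List.maxD ((PySem.Dict.keys pvLower).filter (fun t => decide (t ≤ current))) (fun t => t) 0
  let ds := pvDown 5 tier steps
  pvUp 5 ds.1 ds.2

-- ===== PRECONDITION & SPEC =====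
-- the index of the tier A snaps `current` to (ladder position, 0 = top)
def pvIdx (c : Int) : Int :=
  if 255 ≤ c then 0 else if 200 ≤ c then 1 else if 150 ≤ c then 2 else if 100 ≤ c then 3 else 4

-- Pre_ excludes exactly the inputs where Python A raises IndexError (snapped tier index + steps < -5).
def Pre_drop_tier_py (current : Int) (steps : Int) : Prop :=
  -5 ≤ pvIdx current + steps
instance (current : Int) (steps : Int) : Decidable (Pre_drop_tier_py current steps) := by
  unfold Pre_drop_tier_py; infer_instance

def pvWitness_drop_tier_py : Int × Int := (160, 2)

-- On inputs where the snapped tier index plus steps lands in -4..-1 (climbing past the top tier),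
-- A's negative list index wraps around and returns a lower tier (200/150/100/0) while B clamps at
-- the top and returns 255, the intended result of moving up beyond the highest tier.
def D_drop_tier_py (current : Int) (steps : Int) : Prop :=
  -4 ≤ pvIdx current + steps ∧ pvIdx current + steps ≤ -1
instance (current : Int) (steps : Int) : Decidable (D_drop_tier_py current steps) := by
  unfold D_drop_tier_py; infer_instance

def Spec_drop_tier_py (current : Int) (steps : Int) (out : Int) : Prop :=
  ¬ D_drop_tier_py current steps → out = drop_tier_py_alt current steps
instance (current : Int) (steps : Int) (out : Int) : Decidable (Spec_drop_tier_py current steps out) := by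
  unfold Spec_drop_tier_py; infer_instance

def pvDiffWitness_drop_tier_py : Int × Int := (255, -1)
def pvDiffWitnessOut_drop_tier_py : Int × Int := (0, 255)

-- ===== CLAIM (what is proved, stated in full; the proofs are below) =====
def Claim_unchanged_drop_tier_py : Prop := ∀ (current : Int) (steps : Int), Dom_drop_tier_py current steps → Pre_drop_tier_py current steps → Spec_drop_tier_py current steps (drop_tier_py current steps)
def Claim_changed_drop_tier_py : Prop := Dom_drop_tier_py (pvDiffWitness_drop_tier_py.1) (pvDiffWitness_drop_tier_py.2) ∧ Pre_drop_tier_py (pvDiffWitness_drop_tier_py.1) (pvDiffWitness_drop_tier_py.2) ∧ D_drop_tier_py (pvDiffWitness_drop_tier_py.1) (pvDiffWitness_drop_tier_py.2) ∧ drop_tier_py (pvDiffWitness_drop_tier_py.1) (pvDiffWitness_drop_tier_py.2) = pvDiffWitnessOut_drop_tier_py.1 ∧ drop_tier_py_alt (pvDiffWitness_drop_tier_py.1) (pvDiffWitness_drop_tier_py.2) = pvDiffWitnessOut_drop_tier_py.2 ∧ pvDiffWitnessOut_drop_tier_py.1 ≠ pvDiffWitnessOut_drop_tier_py.2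
def Claim_exact_drop_tier_py : Prop := ∀ (current : Int) (steps : Int), Dom_drop_tier_py current steps → Pre_drop_tier_py current steps → D_drop_tier_py current steps → drop_tier_py current steps ≠ drop_tier_py_alt current steps

-- ===== LEMMAS AND PROOFS =====

theorem pvA_eq (c s : Int) :
    drop_tier_py c s =
      (PySem.List.pyGet? pvLadder (min ((pvLadder.length : Int) - 1) (pvIdx c + s))).getD 0 := by
  by_cases hm : c ∈ pvLadder
  · simp only [pvLadder, List.mem_cons, List.not_mem_nil, or_false] at hm
    rcases hm with h | h | h | h | h <;> subst h <;>
      norm_num [drop_tier_py, pvLadder, pvIdx, PySem.List.index?, List.idxOf?,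
        List.findIdx?, List.findIdx?.go]
  · unfold drop_tier_py
    rw [if_neg hm]
    by_cases h255 : 255 ≤ c
    · have hs : pvSnapA pvLadder c = 255 := by simp [pvSnapA, pvLadder, h255]
      rw [hs]
      norm_num [pvIdx, pvLadder, PySem.List.index?, List.idxOf?, List.findIdx?,
        List.findIdx?.go, h255]
    · by_cases h200 : 200 ≤ c
      · have hs : pvSnapA pvLadder c = 200 := by simp [pvSnapA, pvLadder, h255, h200]
        rw [hs]
        norm_num [pvIdx, pvLadder, PySem.List.index?, List.idxOf?, List.findIdx?,
          List.findIdx?.go, h255, h200]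
      · by_cases h150 : 150 ≤ c
        · have hs : pvSnapA pvLadder c = 150 := by simp [pvSnapA, pvLadder, h255, h200, h150]
          rw [hs]
          norm_num [pvIdx, pvLadder, PySem.List.index?, List.idxOf?, List.findIdx?,
            List.findIdx?.go, h255, h200, h150]
        · by_cases h100 : 100 ≤ c
          · have hs : pvSnapA pvLadder c = 100 := by
              simp [pvSnapA, pvLadder, h255, h200, h150, h100]
            rw [hs]
            norm_num [pvIdx, pvLadder, PySem.List.index?, List.idxOf?, List.findIdx?,
              List.findIdx?.go, h255, h200, h150, h100]
          · have hs : pvSnapA pvLadder c = 0 := by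
              simp [pvSnapA, pvLadder, h255, h200, h150, h100]
            rw [hs]
            norm_num [pvIdx, pvLadder, PySem.List.index?, List.idxOf?, List.findIdx?,
              List.findIdx?.go, h255, h200, h150, h100]

theorem pvDown_stop (f : Nat) (t s : Int) (h : ¬ (0 < s ∧ t ≠ 0)) : pvDown f t s = (t, s) := by
  cases f <;> simp [pvDown, h]
theorem pvUp_stop (f : Nat) (t s : Int) (h : ¬ (s < 0 ∧ t ≠ 255)) : pvUp f t s = t := by
  cases f <;> simp [pvUp, h]
theorem pvDown_step (f : Nat) (t s : Int) (h : 0 < s) (h2 : t ≠ 0) :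
    pvDown (f + 1) t s = pvDown f (PySem.Dict.getD pvLower t 0) (s - 1) := by
  simp [pvDown, h, h2]
theorem pvUp_step (f : Nat) (t s : Int) (h : s < 0) (h2 : t ≠ 255) :
    pvUp (f + 1) t s = pvUp f (PySem.Dict.getD pvHigher t 255) (s + 1) := by
  simp [pvUp, h, h2]

theorem pvWalk255 (s : Int) : pvUp 5 (pvDown 5 255 s).1 (pvDown 5 255 s).2 =
    (PySem.List.pyGet? pvLadder (max 0 (min 4 (0 + s)))).getD 0 := by
  by_cases hhi : 4 ≤ s
  · have hd : pvDown 5 255 s = (0, s - 1 - 1 - 1 - 1) := by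
      rw [pvDown_step 4 255 (s) (by omega) (by decide),
          show PySem.Dict.getD pvLower 255 0 = 200 from by decide,
          pvDown_step 3 200 (s - 1) (by omega) (by decide),
          show PySem.Dict.getD pvLower 200 0 = 150 from by decide,
          pvDown_step 2 150 (s - 1 - 1) (by omega) (by decide),
          show PySem.Dict.getD pvLower 150 0 = 100 from by decide,
          pvDown_step 1 100 (s - 1 - 1 - 1) (by omega) (by decide),
          show PySem.Dict.getD pvLower 100 0 = 0 from by decide,
          pvDown_stop 1 0 (s - 1 - 1 - 1 - 1) (by rintro ⟨-, h2⟩; exact h2 rfl)]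
    rw [hd]
    show pvUp 5 0 (s - 1 - 1 - 1 - 1) = _
    rw [pvUp_stop 5 0 (s - 1 - 1 - 1 - 1) (by rintro ⟨h1, -⟩; omega)]
    rw [show max 0 (min 4 (0 + s)) = 4 from by omega]
    decide
  · by_cases hlo : s ≤ 0
    · have hd : pvDown 5 255 s = (255, s) := pvDown_stop 5 255 s (by rintro ⟨h1, -⟩; omega)
      rw [hd]
      show pvUp 5 255 s = _
      rw [pvUp_stop 5 255 s (by rintro ⟨-, h2⟩; exact h2 rfl)]
      rw [show max 0 (min 4 (0 + s)) = 0 from by omega]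
      decide
    · rcases (by omega : s = 1 ∨ s = 2 ∨ s = 3) with h | h | h <;> subst h <;> decide

theorem pvWalk200 (s : Int) : pvUp 5 (pvDown 5 200 s).1 (pvDown 5 200 s).2 =
    (PySem.List.pyGet? pvLadder (max 0 (min 4 (1 + s)))).getD 0 := by
  by_cases hhi : 3 ≤ s
  · have hd : pvDown 5 200 s = (0, s - 1 - 1 - 1) := by
      rw [pvDown_step 4 200 (s) (by omega) (by decide),
          show PySem.Dict.getD pvLower 200 0 = 150 from by decide,
          pvDown_step 3 150 (s - 1) (by omega) (by decide),
          show PySem.Dict.getD pvLower 150 0 = 100 from by decide,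
          pvDown_step 2 100 (s - 1 - 1) (by omega) (by decide),
          show PySem.Dict.getD pvLower 100 0 = 0 from by decide,
          pvDown_stop 2 0 (s - 1 - 1 - 1) (by rintro ⟨-, h2⟩; exact h2 rfl)]
    rw [hd]
    show pvUp 5 0 (s - 1 - 1 - 1) = _
    rw [pvUp_stop 5 0 (s - 1 - 1 - 1) (by rintro ⟨h1, -⟩; omega)]
    rw [show max 0 (min 4 (1 + s)) = 4 from by omega]
    decide
  · by_cases hlo : s ≤ -1
    · have hd : pvDown 5 200 s = (200, s) := pvDown_stop 5 200 s (by rintro ⟨h1, -⟩; omega)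
      rw [hd]
      show pvUp 5 200 s = _
      rw [pvUp_step 4 200 (s) (by omega) (by decide),
          show PySem.Dict.getD pvHigher 200 255 = 255 from by decide,
          pvUp_stop 4 255 (s + 1) (by rintro ⟨-, h2⟩; exact h2 rfl)]
      rw [show max 0 (min 4 (1 + s)) = 0 from by omega]
      decide
    · rcases (by omega : s = 0 ∨ s = 1 ∨ s = 2) with h | h | h <;> subst h <;> decide

theorem pvWalk150 (s : Int) : pvUp 5 (pvDown 5 150 s).1 (pvDown 5 150 s).2 =
    (PySem.List.pyGet? pvLadder (max 0 (min 4 (2 + s)))).getD 0 := by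
  by_cases hhi : 2 ≤ s
  · have hd : pvDown 5 150 s = (0, s - 1 - 1) := by
      rw [pvDown_step 4 150 (s) (by omega) (by decide),
          show PySem.Dict.getD pvLower 150 0 = 100 from by decide,
          pvDown_step 3 100 (s - 1) (by omega) (by decide),
          show PySem.Dict.getD pvLower 100 0 = 0 from by decide,
          pvDown_stop 3 0 (s - 1 - 1) (by rintro ⟨-, h2⟩; exact h2 rfl)]
    rw [hd]
    show pvUp 5 0 (s - 1 - 1) = _
    rw [pvUp_stop 5 0 (s - 1 - 1) (by rintro ⟨h1, -⟩; omega)]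
    rw [show max 0 (min 4 (2 + s)) = 4 from by omega]
    decide
  · by_cases hlo : s ≤ -2
    · have hd : pvDown 5 150 s = (150, s) := pvDown_stop 5 150 s (by rintro ⟨h1, -⟩; omega)
      rw [hd]
      show pvUp 5 150 s = _
      rw [pvUp_step 4 150 (s) (by omega) (by decide),
          show PySem.Dict.getD pvHigher 150 255 = 200 from by decide,
          pvUp_step 3 200 (s + 1) (by omega) (by decide),
          show PySem.Dict.getD pvHigher 200 255 = 255 from by decide,
          pvUp_stop 3 255 (s + 1 + 1) (by rintro ⟨-, h2⟩; exact h2 rfl)]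
      rw [show max 0 (min 4 (2 + s)) = 0 from by omega]
      decide
    · rcases (by omega : s = (-1) ∨ s = 0 ∨ s = 1) with h | h | h <;> subst h <;> decide

theorem pvWalk100 (s : Int) : pvUp 5 (pvDown 5 100 s).1 (pvDown 5 100 s).2 =
    (PySem.List.pyGet? pvLadder (max 0 (min 4 (3 + s)))).getD 0 := by
  by_cases hhi : 1 ≤ s
  · have hd : pvDown 5 100 s = (0, s - 1) := by
      rw [pvDown_step 4 100 (s) (by omega) (by decide),
          show PySem.Dict.getD pvLower 100 0 = 0 from by decide,
          pvDown_stop 4 0 (s - 1) (by rintro ⟨-, h2⟩; exact h2 rfl)]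
    rw [hd]
    show pvUp 5 0 (s - 1) = _
    rw [pvUp_stop 5 0 (s - 1) (by rintro ⟨h1, -⟩; omega)]
    rw [show max 0 (min 4 (3 + s)) = 4 from by omega]
    decide
  · by_cases hlo : s ≤ -3
    · have hd : pvDown 5 100 s = (100, s) := pvDown_stop 5 100 s (by rintro ⟨h1, -⟩; omega)
      rw [hd]
      show pvUp 5 100 s = _
      rw [pvUp_step 4 100 (s) (by omega) (by decide),
          show PySem.Dict.getD pvHigher 100 255 = 150 from by decide,
          pvUp_step 3 150 (s + 1) (by omega) (by decide),
          show PySem.Dict.getD pvHigher 150 255 = 200 from by decide,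
          pvUp_step 2 200 (s + 1 + 1) (by omega) (by decide),
          show PySem.Dict.getD pvHigher 200 255 = 255 from by decide,
          pvUp_stop 2 255 (s + 1 + 1 + 1) (by rintro ⟨-, h2⟩; exact h2 rfl)]
      rw [show max 0 (min 4 (3 + s)) = 0 from by omega]
      decide
    · rcases (by omega : s = (-2) ∨ s = (-1) ∨ s = 0) with h | h | h <;> subst h <;> decide

theorem pvWalk0 (s : Int) : pvUp 5 (pvDown 5 0 s).1 (pvDown 5 0 s).2 =
    (PySem.List.pyGet? pvLadder (max 0 (min 4 (4 + s)))).getD 0 := by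
  by_cases hhi : 0 ≤ s
  · rw [pvDown_stop 5 0 s (by rintro ⟨-, h2⟩; exact h2 rfl)]
    show pvUp 5 0 s = _
    rw [pvUp_stop 5 0 s (by rintro ⟨h1, -⟩; omega)]
    rw [show max 0 (min 4 (4 + s)) = 4 from by omega]
    decide
  · by_cases hlo : s ≤ -4
    · have hd : pvDown 5 0 s = (0, s) := pvDown_stop 5 0 s (by rintro ⟨-, h2⟩; exact h2 rfl)
      rw [hd]
      show pvUp 5 0 s = _
      rw [pvUp_step 4 0 (s) (by omega) (by decide),
          show PySem.Dict.getD pvHigher 0 255 = 100 from by decide,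
          pvUp_step 3 100 (s + 1) (by omega) (by decide),
          show PySem.Dict.getD pvHigher 100 255 = 150 from by decide,
          pvUp_step 2 150 (s + 1 + 1) (by omega) (by decide),
          show PySem.Dict.getD pvHigher 150 255 = 200 from by decide,
          pvUp_step 1 200 (s + 1 + 1 + 1) (by omega) (by decide),
          show PySem.Dict.getD pvHigher 200 255 = 255 from by decide,
          pvUp_stop 1 255 (s + 1 + 1 + 1 + 1) (by rintro ⟨-, h2⟩; exact h2 rfl)]
      rw [show max 0 (min 4 (4 + s)) = 0 from by omega]
      decide
    · rcases (by omega : s = (-3) ∨ s = (-2) ∨ s = (-1)) with h | h | h <;> subst h <;> decide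

theorem pvSnap_eq (c : Int) :
    PySem.List.maxD ((PySem.Dict.keys pvLower).filter (fun t => decide (t ≤ c))) (fun t => t) 0 =
      (PySem.List.pyGet? pvLadder (pvIdx c)).getD 0 := by
  rw [show PySem.Dict.keys pvLower = [255, 200, 150, 100, 0] from by decide]
  unfold pvIdx
  by_cases h255 : 255 ≤ c
  · norm_num [PySem.List.maxD, PySem.List.max?, h255, show (200:Int) ≤ c by omega,
      show (150:Int) ≤ c by omega, show (100:Int) ≤ c by omega, show (0:Int) ≤ c by omega]
    decide
  · by_cases h200 : 200 ≤ c
    · norm_num [PySem.List.maxD, PySem.List.max?, h255, h200, show (150:Int) ≤ c by omega,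
        show (100:Int) ≤ c by omega, show (0:Int) ≤ c by omega]
      decide
    · by_cases h150 : 150 ≤ c
      · norm_num [PySem.List.maxD, PySem.List.max?, h255, h200, h150,
          show (100:Int) ≤ c by omega, show (0:Int) ≤ c by omega]
        decide
      · by_cases h100 : 100 ≤ c
        · norm_num [PySem.List.maxD, PySem.List.max?, h255, h200, h150, h100,
            show (0:Int) ≤ c by omega]
          decide
        · by_cases h0 : 0 ≤ c
          · norm_num [PySem.List.maxD, PySem.List.max?, h255, h200, h150, h100, h0]
            decide
          · norm_num [PySem.List.maxD, PySem.List.max?, h255, h200, h150, h100, h0]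
            decide

theorem pvB_eq (c s : Int) :
    drop_tier_py_alt c s =
      (PySem.List.pyGet? pvLadder (max 0 (min 4 (pvIdx c + s)))).getD 0 := by
  show pvUp 5 (pvDown 5 (PySem.List.maxD ((PySem.Dict.keys pvLower).filter (fun t => decide (t ≤ c))) (fun t => t) 0) s).1
        (pvDown 5 (PySem.List.maxD ((PySem.Dict.keys pvLower).filter (fun t => decide (t ≤ c))) (fun t => t) 0) s).2 = _
  rw [pvSnap_eq c]
  unfold pvIdx
  by_cases h255 : 255 ≤ c
  · simp only [h255, if_true]
    exact pvWalk255 s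
  · by_cases h200 : 200 ≤ c
    · simp only [h255, h200, if_true, if_false]
      exact pvWalk200 s
    · by_cases h150 : 150 ≤ c
      · simp only [h255, h200, h150, if_true, if_false]
        exact pvWalk150 s
      · by_cases h100 : 100 ≤ c
        · simp only [h255, h200, h150, h100, if_true, if_false]
          exact pvWalk100 s
        · simp only [h255, h200, h150, h100, if_false]
          exact pvWalk0 s

-- ===== VERDICT (by name: the statement is the Claim_ definition above) =====
theorem drop_tier_py_spec : Claim_unchanged_drop_tier_py := by
  intro c s _ hpre
  unfold Spec_drop_tier_py
  intro hnd
  have hpre' : -5 ≤ pvIdx c + s := hpre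
  have hnd' : ¬ (-4 ≤ pvIdx c + s ∧ pvIdx c + s ≤ -1) := hnd
  rw [pvA_eq, pvB_eq]
  rcases (by omega : pvIdx c + s = -5 ∨ 0 ≤ pvIdx c + s) with h | h
  · rw [h]; decide
  · have h1 : min ((pvLadder.length : Int) - 1) (pvIdx c + s) = min 4 (pvIdx c + s) := by
      norm_num [pvLadder]
    have h2 : max 0 (min 4 (pvIdx c + s)) = min 4 (pvIdx c + s) := by omega
    rw [h1, h2]

theorem drop_tier_py_changed : Claim_changed_drop_tier_py := by
  unfold Claim_changed_drop_tier_py; decide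

theorem drop_tier_py_tight : Claim_exact_drop_tier_py := by
  intro c s _ _ hd
  have hd' : -4 ≤ pvIdx c + s ∧ pvIdx c + s ≤ -1 := hd
  rw [pvA_eq, pvB_eq]
  rcases (by omega : pvIdx c + s = -4 ∨ pvIdx c + s = -3 ∨ pvIdx c + s = -2 ∨
      pvIdx c + s = -1) with h | h | h | h <;> rw [h] <;> decide
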